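-- pv_equiv track=rewrite | github.com/dillonpike/COSC262 | Exam Practice/Reaching Vertices.py | reaching_vertices
-- ===== SOURCE A (Python) =====
-- def reaching_vertices(adj_list, target):
--     vertices = set()
--     for j in range(len(adj_list)):
--         for i, vertex in enumerate(adj_list):
--             if i == target:
--                 vertices |= {i}
--                 continue
--             for edge in vertex:
--                 if target == edge[0] or edge[0] in vertices:
--                     vertices |= {i}
--                     break
--     return vertices
-- ===== SOURCE B (Python) =====
-- def reaching_vertices(adj_list, target):
--     """Worklist fixed-point: keep only unresolved vertices between passes and
--     stop as soon as a pass adds nothing, instead of always doing len(adj_list)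
--     full passes."""
--     vertices = set()
--     remaining = list(range(len(adj_list)))
--     while remaining:
--         nxt = []
--         for i in remaining:
--             if i == target or any(edge[0] == target or edge[0] in vertices
--                                   for edge in adj_list[i]):
--                 vertices |= {i}
--             else:
--                 nxt.append(i)
--         if len(nxt) == len(remaining):
--             break
--         remaining = nxt
--     return vertices
-- ===== Notes on version B (the rewrite author's own statement) =====
-- stated objective: faster
-- what changed: A always runs len(adj_list) full passes over every vertex; B keeps a worklist of still-unresolved vertices, re-scans only those, and stops at the first pass that adds nothing (early fixed-point exit).
import Mathlib
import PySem

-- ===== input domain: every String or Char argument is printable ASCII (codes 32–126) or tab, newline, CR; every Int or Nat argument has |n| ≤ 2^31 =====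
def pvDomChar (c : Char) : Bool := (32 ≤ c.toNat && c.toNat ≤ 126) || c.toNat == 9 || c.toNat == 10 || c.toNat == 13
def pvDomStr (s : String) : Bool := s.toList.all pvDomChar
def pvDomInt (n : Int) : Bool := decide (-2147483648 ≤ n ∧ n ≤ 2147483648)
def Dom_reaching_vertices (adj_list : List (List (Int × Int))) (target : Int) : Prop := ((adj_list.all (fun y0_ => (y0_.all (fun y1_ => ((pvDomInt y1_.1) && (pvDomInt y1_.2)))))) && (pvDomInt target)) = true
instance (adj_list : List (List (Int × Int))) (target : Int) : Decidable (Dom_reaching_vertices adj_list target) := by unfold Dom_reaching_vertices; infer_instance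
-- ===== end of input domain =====

-- B replaces A's fixed len(adj_list) full Gauss-Seidel passes over ALL vertices by worklist
-- passes over only the still-unresolved vertices, stopping at the first pass that adds nothing.

-- ===== PORT A =====
-- inner loop 'for edge in vertex: if target == edge[0] or edge[0] in vertices: vertices |= {i}; break'
def pvScanA (target i : Int) (vs : PySem.Set Int) : List (Int × Int) → PySem.Set Int
  | [] => vs
  | e :: es =>
    if target == e.1 || PySem.Set.contains vs e.1 then PySem.Set.add vs i
    else pvScanA target i vs es

-- body of 'for i, vertex in enumerate(adj_list): …'
def pvBodyA (target : Int) (vs : PySem.Set Int) (p : Int × List (Int × Int)) : PySem.Set Int :=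
  if p.1 == target then PySem.Set.add vs p.1 else pvScanA target p.1 vs p.2

def reaching_vertices (adj_list : List (List (Int × Int))) (target : Int) : List Int :=
  (PySem.List.pyRange 0 (adj_list.length : Int)).foldl
    (fun vs _ => (PySem.List.enumerate adj_list).foldl (pvBodyA target) vs) []

-- ===== PORT B =====
-- 'i == target or any(edge[0] == target or edge[0] in vertices for edge in adj_list[i])'
def pvHitB (adj_list : List (List (Int × Int))) (target i : Int) (vs : PySem.Set Int) : Bool :=
  i == target ||
    (PySem.List.pyGetD adj_list i []).any (fun e => e.1 == target || PySem.Set.contains vs e.1)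

-- body of 'for i in remaining: …' over the state (vertices, nxt)
def pvStepB (adj_list : List (List (Int × Int))) (target : Int)
    (s : PySem.Set Int × List Int) (i : Int) : PySem.Set Int × List Int :=
  if pvHitB adj_list target i s.1 then (PySem.Set.add s.1 i, s.2) else (s.1, s.2 ++ [i])

-- one pass of the while-loop body
def pvPassB (adj_list : List (List (Int × Int))) (target : Int)
    (vs : PySem.Set Int) (rem : List Int) : PySem.Set Int × List Int :=
  rem.foldl (pvStepB adj_list target) (vs, [])

-- termination fact the while-loop port cites: a pass never lengthens the worklist
theorem pvStepB_len (adj_list : List (List (Int × Int))) (target : Int) :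
    ∀ (l : List Int) (s : PySem.Set Int × List Int),
      (l.foldl (pvStepB adj_list target) s).2.length ≤ s.2.length + l.length := by
  intro l
  induction l with
  | nil => intro s; simp
  | cons a t ih =>
    intro s
    have h1 : (pvStepB adj_list target s a).2.length ≤ s.2.length + 1 := by
      unfold pvStepB; split <;> simp
    have h2 := ih (pvStepB adj_list target s a)
    simp only [List.foldl_cons, List.length_cons]
    omega

-- 'while remaining: … ; if len(nxt) == len(remaining): break ; remaining = nxt'
def pvLoopB (adj_list : List (List (Int × Int))) (target : Int)
    (vs : PySem.Set Int) (rem : List Int) : PySem.Set Int :=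
  if rem.isEmpty then vs
  else
    let r := pvPassB adj_list target vs rem
    if h : r.2.length = rem.length then r.1
    else pvLoopB adj_list target r.1 r.2
termination_by rem.length
decreasing_by
  have hle := pvStepB_len adj_list target rem (vs, [])
  simp only [r, pvPassB] at h ⊢
  simp only [List.length_nil] at hle
  omega

def reaching_vertices_alt (adj_list : List (List (Int × Int))) (target : Int) : List Int :=
  pvLoopB adj_list target [] (PySem.List.pyRange 0 (adj_list.length : Int))

-- ===== PRECONDITION & SPEC =====
def Spec_reaching_vertices (adj_list : List (List (Int × Int))) (target : Int) (out : List Int) : Prop := out = reaching_vertices_alt adj_list target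
instance (adj_list : List (List (Int × Int))) (target : Int) (out : List Int) : Decidable (Spec_reaching_vertices adj_list target out) := by unfold Spec_reaching_vertices; infer_instance

-- ===== CLAIM (what is proved, stated in full; the proofs are below) =====
def Claim_equal_reaching_vertices : Prop := ∀ (adj_list : List (List (Int × Int))) (target : Int), Dom_reaching_vertices adj_list target → Spec_reaching_vertices adj_list target (reaching_vertices adj_list target)

-- ===== LEMMAS AND PROOFS =====

-- break-scan = any
theorem pvScanA_eq (target i : Int) (vs : PySem.Set Int) (es : List (Int × Int)) :
    pvScanA target i vs es =
      if es.any (fun e => e.1 == target || PySem.Set.contains vs e.1) then PySem.Set.add vs i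
      else vs := by
  induction es with
  | nil => simp [pvScanA]
  | cons e es ih =>
    have hb : (target == e.1 || PySem.Set.contains vs e.1)
        = (e.1 == target || PySem.Set.contains vs e.1) := by
      rw [Bool.beq_comm]
    simp only [pvScanA, List.any_cons, hb, ih]
    by_cases h : e.1 = target ∨ e.1 ∈ vs
    · have hbo : (e.1 == target || List.contains vs e.1) = true := by
        rcases h with h | h <;> simp [h]
      simp [h]
    · have h2 := not_or.mp h
      have hbo : (e.1 == target || PySem.Set.contains vs e.1) = false := by
        simp only [PySem.Set.contains_eq_listContains, Bool.or_eq_false_iff,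
          beq_eq_false_iff_ne, ne_eq]
        exact ⟨h2.1, by simpa using h2.2⟩
      simp only [hbo, Bool.false_or, Bool.false_eq_true, if_false]

-- A's loop body in terms of B's hit test (under the adj_list[i] = es consistency)
theorem pvBodyA_eq_hit (adj_list : List (List (Int × Int))) (target : Int)
    (vs : PySem.Set Int) (p : Int × List (Int × Int))
    (hlook : PySem.List.pyGetD adj_list p.1 [] = p.2) :
    pvBodyA target vs p =
      if pvHitB adj_list target p.1 vs then PySem.Set.add vs p.1 else vs := by
  unfold pvBodyA pvHitB
  rw [hlook]
  by_cases ht : (p.1 == target) = true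
  · simp [ht]
  · simp only [Bool.not_eq_true] at ht
    rw [pvScanA_eq, ht, Bool.false_or]
    simp

theorem pvBodyA_shape (target : Int) (vs : PySem.Set Int) (p : Int × List (Int × Int)) :
    pvBodyA target vs p = vs ∨ (p.1 ∉ vs ∧ pvBodyA target vs p = vs ++ [p.1]) := by
  have hb : pvBodyA target vs p = PySem.Set.add vs p.1 ∨ pvBodyA target vs p = vs := by
    unfold pvBodyA
    rw [pvScanA_eq]
    split
    · exact Or.inl rfl
    · split
      · exact Or.inl rfl
      · exact Or.inr rfl
  by_cases hm : p.1 ∈ vs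
  · rcases hb with hb | hb <;> rw [hb]
    · exact Or.inl (PySem.Set.add_of_mem hm)
    · exact Or.inl rfl
  · rcases hb with hb | hb <;> rw [hb]
    · exact Or.inr ⟨hm, PySem.Set.add_of_not_mem hm⟩
    · exact Or.inl rfl

theorem pvFoldA_shape (target : Int) :
    ∀ (ps : List (Int × List (Int × Int))) (vs : PySem.Set Int),
      ∃ t, ps.foldl (pvBodyA target) vs = vs ++ t ∧ ∀ x ∈ t, x ∈ ps.map (·.1) := by
  intro ps
  induction ps with
  | nil => intro vs; exact ⟨[], by simp⟩
  | cons p ps ih =>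
    intro vs
    rcases pvBodyA_shape target vs p with hb | ⟨_, hb⟩ <;>
      simp only [List.foldl_cons, hb]
    · obtain ⟨t, ht, hmem⟩ := ih vs
      exact ⟨t, ht, fun x hx => by simp [hmem x hx]⟩
    · obtain ⟨t, ht, hmem⟩ := ih (vs ++ [p.1])
      refine ⟨p.1 :: t, by simpa using ht, fun x hx => ?_⟩
      rcases List.mem_cons.mp hx with rfl | hx
      · simp
      · simp [hmem x hx]

theorem pvFoldA_nodup (target : Int) :
    ∀ (ps : List (Int × List (Int × Int))) (vs : PySem.Set Int),
      vs.Nodup → (ps.foldl (pvBodyA target) vs).Nodup := by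
  intro ps
  induction ps with
  | nil => intro vs h; exact h
  | cons p ps ih =>
    intro vs hvs
    rcases pvBodyA_shape target vs p with hb | ⟨hm, hb⟩ <;>
      simp only [List.foldl_cons, hb]
    · exact ih vs hvs
    · refine ih (vs ++ [p.1]) ?_
      refine List.Nodup.append hvs (List.nodup_singleton _) ?_
      intro a ha hb
      rw [List.mem_singleton] at hb
      exact hm (hb ▸ ha)

-- the pass-agreement lemma: B's pass over the unresolved vertices computes A's full pass,
-- and returns exactly the vertices still unresolved afterwards
theorem pvPassAgree (adj_list : List (List (Int × Int))) (target : Int) :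
    ∀ (ps : List (Int × List (Int × Int))) (vs nxt0 : List Int),
      (ps.map (·.1)).Nodup →
      (∀ p ∈ ps, PySem.List.pyGetD adj_list p.1 [] = p.2) →
      ((ps.filter (fun p => !(vs.contains p.1))).map (·.1)).foldl
          (pvStepB adj_list target) (vs, nxt0)
        = (ps.foldl (pvBodyA target) vs,
           nxt0 ++ (ps.filter
             (fun p => !((ps.foldl (pvBodyA target) vs).contains p.1))).map (·.1)) := by
  intro ps
  induction ps with
  | nil =>
    intro vs nxt0 _ _
    simp
  | cons p ps ih =>
    intro vs nxt0 hnd hlook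
    rw [List.map_cons] at hnd
    have hndc := List.nodup_cons.mp hnd
    have hpn : p.1 ∉ ps.map (·.1) := hndc.1
    have hndtail : (ps.map (·.1)).Nodup := hndc.2
    have hlookp := hlook p List.mem_cons_self
    have hlooktail : ∀ q ∈ ps, PySem.List.pyGetD adj_list q.1 [] = q.2 :=
      fun q hq => hlook q (List.mem_cons_of_mem _ hq)
    by_cases hm : p.1 ∈ vs
    · have hbody : pvBodyA target vs p = vs := by
        rcases pvBodyA_shape target vs p with hb | ⟨hnm, _⟩
        · exact hb
        · exact absurd hm hnm
      have hFsup : p.1 ∈ ps.foldl (pvBodyA target) vs := by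
        obtain ⟨t, ht, _⟩ := pvFoldA_shape target ps vs
        rw [ht]
        exact List.mem_append_left _ hm
      have hfilL : List.filter (fun q => !(List.contains vs q.1)) (p :: ps)
          = List.filter (fun q => !(List.contains vs q.1)) ps := by
        simp [hm]
      have hfilR : List.filter
            (fun q => !(List.contains (ps.foldl (pvBodyA target) vs) q.1)) (p :: ps)
          = List.filter
            (fun q => !(List.contains (ps.foldl (pvBodyA target) vs) q.1)) ps := by
        simp [hFsup]
      simp only [List.foldl_cons, hbody]
      rw [hfilL]
      have hcont : (List.foldl (pvBodyA target) vs ps).contains p.1 = true := by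
        simpa using hFsup
      simp only [List.filter_cons, hcont, Bool.not_true, Bool.false_eq_true, if_false]
      exact ih vs nxt0 hndtail hlooktail
    · have hfilL : List.filter (fun q => !(List.contains vs q.1)) (p :: ps)
          = p :: List.filter (fun q => !(List.contains vs q.1)) ps := by
        simp [hm]
      by_cases hhit : pvHitB adj_list target p.1 vs = true
      · have hbody : pvBodyA target vs p = vs ++ [p.1] := by
          rw [pvBodyA_eq_hit adj_list target vs p hlookp, if_pos hhit]
          exact PySem.Set.add_of_not_mem hm
        have hstep : pvStepB adj_list target (vs, nxt0) p.1 = (vs ++ [p.1], nxt0) := by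
          unfold pvStepB
          rw [if_pos hhit]
          rw [PySem.Set.add_of_not_mem hm]
        have hfc : List.filter (fun q => !(List.contains vs q.1)) ps
            = List.filter (fun q => !(List.contains (vs ++ [p.1]) q.1)) ps := by
          apply List.filter_congr
          intro q hq
          have hne : q.1 ≠ p.1 := by
            intro hh
            exact hpn (hh ▸ List.mem_map_of_mem hq)
          simp [hne]
        have hFp : p.1 ∈ ps.foldl (pvBodyA target) (vs ++ [p.1]) := by
          obtain ⟨t, ht, _⟩ := pvFoldA_shape target ps (vs ++ [p.1])
          rw [ht]
          exact List.mem_append_left _ (by simp)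
        rw [hfilL]
        simp only [List.map_cons, List.foldl_cons, hstep, hbody]
        rw [hfc]
        rw [ih (vs ++ [p.1]) nxt0 hndtail hlooktail]
        simp [hFp]
      · have hbody : pvBodyA target vs p = vs := by
          rw [pvBodyA_eq_hit adj_list target vs p hlookp, if_neg hhit]
        have hstep : pvStepB adj_list target (vs, nxt0) p.1 = (vs, nxt0 ++ [p.1]) := by
          unfold pvStepB
          rw [if_neg hhit]
        have hFnp : p.1 ∉ ps.foldl (pvBodyA target) vs := by
          obtain ⟨t, ht, htm⟩ := pvFoldA_shape target ps vs
          rw [ht]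
          intro hmem
          rcases List.mem_append.mp hmem with h1 | h1
          · exact hm h1
          · exact hpn (htm _ h1)
        rw [hfilL]
        simp only [List.map_cons, List.foldl_cons, hstep, hbody]
        rw [ih vs (nxt0 ++ [p.1]) hndtail hlooktail]
        simp [hFnp]

theorem pvFilterSublist (l : List (Int × List (Int × Int)))
    (p q : (Int × List (Int × Int)) → Bool) (h : ∀ a ∈ l, p a = true → q a = true) :
    List.Sublist (l.filter p) (l.filter q) := by
  induction l with
  | nil => simp
  | cons a t ih =>
    simp only [List.filter_cons]
    have ihq := ih (fun x hx => h x (List.mem_cons_of_mem _ hx))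
    by_cases hp : p a = true
    · rw [if_pos hp, if_pos (h a List.mem_cons_self hp)]
      exact ihq.cons₂ a
    · rw [if_neg hp]
      split
      · exact ihq.cons a
      · exact ihq

theorem pvEnumLookup (adj_list : List (List (Int × Int))) :
    ∀ p ∈ PySem.List.enumerate adj_list, PySem.List.pyGetD adj_list p.1 [] = p.2 := by
  intro p hp
  rw [PySem.List.mem_enumerate_iff] at hp
  obtain ⟨k, hk, rfl⟩ := hp
  simp only [zero_add]
  rw [PySem.List.pyGetD_natCast]
  simp [List.getD_eq_getElem?_getD, List.getElem?_eq_getElem hk]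

theorem pvEnumFstNodup (adj_list : List (List (Int × Int))) :
    ((PySem.List.enumerate adj_list).map (·.1)).Nodup := by
  rw [PySem.List.map_fst_enumerate]
  simp [pysem]

theorem pvFoldlConst {α : Type} (f : List Int → List Int) :
    ∀ (l : List α) (v : List Int), l.foldl (fun vs _ => f vs) v = f^[l.length] v := by
  intro l
  induction l with
  | nil => intro v; rfl
  | cons a t ih => intro v; simp [ih, Function.iterate_succ_apply]

-- the loop simulation: k passes of A from a state vs whose unresolved worklist is rem
theorem pvLoopMain (adj_list : List (List (Int × Int))) (target : Int) :
    ∀ (k : Nat) (vs rem : List Int), vs.Nodup →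
      rem = ((PySem.List.enumerate adj_list).filter (fun p => !(vs.contains p.1))).map (·.1) →
      rem.length ≤ k →
      (fun s => (PySem.List.enumerate adj_list).foldl (pvBodyA target) s)^[k] vs
        = pvLoopB adj_list target vs rem := by
  intro k
  induction k with
  | zero =>
    intro vs rem hnd hrem hlen
    have hremnil : rem = [] := List.eq_nil_of_length_eq_zero (Nat.le_zero.mp hlen)
    subst hremnil
    rw [pvLoopB]
    simp
  | succ k ih =>
    intro vs rem hnd hrem hlen
    have hpa := pvPassAgree adj_list target (PySem.List.enumerate adj_list) vs []
      (pvEnumFstNodup adj_list) (pvEnumLookup adj_list)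
    rw [List.nil_append] at hpa
    by_cases hnil : rem = []
    · subst hnil
      have hstable : (PySem.List.enumerate adj_list).foldl (pvBodyA target) vs = vs := by
        rw [← hrem] at hpa
        simp only [List.foldl_nil, Prod.mk.injEq] at hpa
        exact hpa.1.symm
      rw [pvLoopB]
      simp only [List.isEmpty_nil, if_true]
      exact Function.iterate_fixed hstable (k + 1)
    · have hpass : pvPassB adj_list target vs rem
          = ((PySem.List.enumerate adj_list).foldl (pvBodyA target) vs,
             (List.filter
               (fun p => !(((PySem.List.enumerate adj_list).foldl (pvBodyA target) vs).contains p.1))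
               (PySem.List.enumerate adj_list)).map (·.1)) := by
        unfold pvPassB
        rw [hrem]
        exact hpa
      obtain ⟨t, ht, htm⟩ := pvFoldA_shape target (PySem.List.enumerate adj_list) vs
      have hsubl : List.Sublist
          (List.filter
            (fun p => !(((PySem.List.enumerate adj_list).foldl (pvBodyA target) vs).contains p.1))
            (PySem.List.enumerate adj_list))
          (List.filter (fun p => !(vs.contains p.1)) (PySem.List.enumerate adj_list)) := by
        apply pvFilterSublist
        intro a _ hc
        have hnotF : a.1 ∉ (PySem.List.enumerate adj_list).foldl (pvBodyA target) vs := by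
          simpa using hc
        have hnotvs : a.1 ∉ vs := fun hv => hnotF (by rw [ht]; exact List.mem_append_left _ hv)
        simpa using hnotvs
      have hlenY : ((List.filter
            (fun p => !(((PySem.List.enumerate adj_list).foldl (pvBodyA target) vs).contains p.1))
            (PySem.List.enumerate adj_list)).map (·.1)).length ≤ rem.length := by
        rw [hrem]
        simpa using hsubl.length_le
      have hne : rem.isEmpty = false := by
        cases rem
        · exact absurd rfl hnil
        · rfl
      rw [pvLoopB]
      rw [if_neg (by simp [hne])]
      simp only [hpass]
      by_cases hlen2 : ((List.filter
            (fun p => !(((PySem.List.enumerate adj_list).foldl (pvBodyA target) vs).contains p.1))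
            (PySem.List.enumerate adj_list)).map (·.1)).length = rem.length
      · rw [dif_pos hlen2]
        -- the pass added nothing: the fold is a fixed point
        have hfeq : List.filter
              (fun p => !(((PySem.List.enumerate adj_list).foldl (pvBodyA target) vs).contains p.1))
              (PySem.List.enumerate adj_list)
            = List.filter (fun p => !(vs.contains p.1)) (PySem.List.enumerate adj_list) := by
          apply hsubl.eq_of_length
          have h1 := hlen2
          rw [hrem] at h1
          simpa using h1
        have hndF := pvFoldA_nodup target (PySem.List.enumerate adj_list) vs hnd
        have ht0 : t = [] := by
          rw [List.eq_nil_iff_forall_not_mem]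
          intro x hx
          obtain ⟨a, haenum, hax⟩ := List.mem_map.mp (htm x hx)
          have hxF : x ∈ (PySem.List.enumerate adj_list).foldl (pvBodyA target) vs := by
            rw [ht]; exact List.mem_append_right _ hx
          have hxvs : x ∉ vs := by
            rw [ht] at hndF
            exact fun hv => (List.disjoint_of_nodup_append hndF) hv hx
          have hca : a ∈ List.filter (fun p => !(vs.contains p.1)) (PySem.List.enumerate adj_list) := by
            rw [List.mem_filter]
            refine ⟨haenum, ?_⟩
            simpa [hax] using hxvs
          rw [← hfeq, List.mem_filter] at hca
          have hxnF : x ∉ (PySem.List.enumerate adj_list).foldl (pvBodyA target) vs := by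
            have h2 := hca.2
            rw [← hax]
            simpa using h2
          exact hxnF hxF
        have hstable : (PySem.List.enumerate adj_list).foldl (pvBodyA target) vs = vs := by
          rw [ht, ht0, List.append_nil]
        rw [hstable]
        exact Function.iterate_fixed hstable (k + 1)
      · rw [dif_neg hlen2]
        rw [Function.iterate_succ_apply]
        exact ih ((PySem.List.enumerate adj_list).foldl (pvBodyA target) vs) _
          (pvFoldA_nodup target (PySem.List.enumerate adj_list) vs hnd) rfl
          (by omega)

-- ===== VERDICT (by name: the statement is the Claim_ definition above) =====
theorem reaching_vertices_spec : Claim_equal_reaching_vertices := by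
  intro adj_list target _
  unfold Spec_reaching_vertices reaching_vertices reaching_vertices_alt
  rw [pvFoldlConst (fun s => (PySem.List.enumerate adj_list).foldl (pvBodyA target) s)]
  exact pvLoopMain adj_list target _ [] _ List.nodup_nil
    (by simp [PySem.List.map_fst_enumerate]) le_rfl
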